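-- pv_equiv track=rewrite | github.com/vike256/Wordbot | src/main.py | word_can_be_constucted
-- ===== SOURCE A (Python) =====
-- letter_points = {  # Create a dictionary to store the points for each letter
--     'a': 1,     'b': 3,     'c': 3,
--     'd': 2,     'e': 1,     'f': 4,
--     'g': 2,     'h': 4,     'i': 1,
--     'j': 8,     'k': 5,     'l': 2,
--     'm': 3,     'n': 1,     'o': 1,
--     'p': 3,     'q': 10,    'r': 1,
--     's': 1,     't': 1,     'u': 1,
--     'v': 4,     'w': 4,     'x': 8,
--     'y': 4,     'z': 10,    '_': 0
-- }
--
-- def word_can_be_constucted(letters, word):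
--     points = 0
--     blanks = letters.count('_')
--     missing_letters = 0
--     available_letters = letters.copy()
--
--     for char in word:
--         if char in available_letters:
--             available_letters.remove(char)
--             points += letter_points[char]
--         else:
--             missing_letters += 1
--             if missing_letters > blanks:
--                 break
--
--     if missing_letters > blanks:
--         points = 0
--
--     return points
-- ===== SOURCE B (Python) =====
-- letter_points = {  # Create a dictionary to store the points for each letter
--     'a': 1,     'b': 3,     'c': 3,
--     'd': 2,     'e': 1,     'f': 4,
--     'g': 2,     'h': 4,     'i': 1,
--     'j': 8,     'k': 5,     'l': 2,
--     'm': 3,     'n': 1,     'o': 1,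
--     'p': 3,     'q': 10,    'r': 1,
--     's': 1,     't': 1,     'u': 1,
--     'v': 4,     'w': 4,     'x': 8,
--     'y': 4,     'z': 10,    '_': 0
-- }
--
-- def word_can_be_constucted(letters, word):
--     # Aggregate arithmetic over the distinct letters of the word instead of a
--     # per-character greedy scan with removal.
--     blanks = letters.count('_')
--     need = {}
--     for ch in word:
--         need[ch] = need.get(ch, 0) + 1
--     score = 0
--     missing = 0
--     for ch, n in need.items():
--         have = letters.count(ch)
--         m = n if n < have else have
--         if m:
--             score += m * letter_points[ch]
--         if n > have:
--             missing += n - have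
--     return score if missing <= blanks else 0
-- ===== Notes on version B (the rewrite author's own statement) =====
-- stated objective: alternative
-- what changed: Replaces A's per-character greedy scan over the word with removal from a mutable copy of letters (and an early break) by one frequency pass: build a count dict of the word, then for each distinct letter compute matched = min(need, available) and missing = need - available by arithmetic, returning 0 iff total missing exceeds the blank count.
-- outside the precondition, e.g. on word_can_be_constucted(['X'], 'zX'): A returns 0, B raises KeyError
import Mathlib
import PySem

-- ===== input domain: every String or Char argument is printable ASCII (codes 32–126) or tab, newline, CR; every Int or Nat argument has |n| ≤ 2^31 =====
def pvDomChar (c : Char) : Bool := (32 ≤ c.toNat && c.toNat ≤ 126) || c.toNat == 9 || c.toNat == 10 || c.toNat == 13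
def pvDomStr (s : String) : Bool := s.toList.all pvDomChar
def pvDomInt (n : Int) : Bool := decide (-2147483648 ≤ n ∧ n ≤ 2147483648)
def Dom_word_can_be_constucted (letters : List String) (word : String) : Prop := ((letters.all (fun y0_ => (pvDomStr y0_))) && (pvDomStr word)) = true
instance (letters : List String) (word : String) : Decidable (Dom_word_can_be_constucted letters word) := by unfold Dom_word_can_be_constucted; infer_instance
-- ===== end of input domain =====

-- B replaces A's per-character greedy scan (with removal from a copied letters list and an
-- early break) by one frequency pass over the distinct letters of the word; alternative
-- decomposition, same exact return value on Pre_.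

-- ===== PORT A =====
-- letter_points (module-level dict)
def wcbLetterPoints : PySem.Dict String Int := PySem.Dict.ofList
  [("a",1),("b",3),("c",3),("d",2),("e",1),("f",4),("g",2),("h",4),("i",1),
   ("j",8),("k",5),("l",2),("m",3),("n",1),("o",1),("p",3),("q",10),("r",1),
   ("s",1),("t",1),("u",1),("v",4),("w",4),("x",8),("y",4),("z",10),("_",0)]

-- letter_points[s]; the KeyError inputs are excluded by Pre_, where getD 0 is exact
def wcbPts (s : String) : Int := (wcbLetterPoints.get? s).getD 0

-- A's for-loop, state (missing_letters, points, available_letters); on break the function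
-- returns 0 (missing_letters > blanks holds at the break)
def wcbLoop (blanks : Int) : List Char → Int → Int → List String → Int
  | [], missing, points, _ => if missing > blanks then 0 else points
  | c :: rest, missing, points, avail =>
    if avail.contains (String.ofList [c]) then
      wcbLoop blanks rest missing (points + wcbPts (String.ofList [c]))
        ((PySem.List.remove? avail (String.ofList [c])).getD avail)
    else
      if missing + 1 > blanks then 0
      else wcbLoop blanks rest (missing + 1) points avail

def word_can_be_constucted (letters : List String) (word : String) : Int :=
  let blanks : Int := (PySem.List.count letters "_" : Int)
  wcbLoop blanks word.toList 0 0 letters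

-- ===== PORT B =====
def word_can_be_constucted_alt (letters : List String) (word : String) : Int :=
  let blanks : Int := (PySem.List.count letters "_" : Int)
  let need : PySem.Dict Char Int :=
    word.toList.foldl (fun d ch => d.insert ch (d.getD ch 0 + 1)) PySem.Dict.empty
  let res : Int × Int := need.items.foldl
    (fun sm p =>
      (if (if p.2 < (PySem.List.count letters (String.ofList [p.1]) : Int) then p.2
           else (PySem.List.count letters (String.ofList [p.1]) : Int)) ≠ 0 then
         sm.1 + (if p.2 < (PySem.List.count letters (String.ofList [p.1]) : Int) then p.2
                 else (PySem.List.count letters (String.ofList [p.1]) : Int)) * wcbPts (String.ofList [p.1])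
       else sm.1,
       if p.2 > (PySem.List.count letters (String.ofList [p.1]) : Int) then
         sm.2 + (p.2 - (PySem.List.count letters (String.ofList [p.1]) : Int))
       else sm.2))
    (0, 0)
  if res.2 ≤ blanks then res.1 else 0

-- ===== PRECONDITION & SPEC =====
-- Pre_ excludes exactly the inputs where some character of word that occurs in letters is not a
-- key of letter_points: there the Python programs raise KeyError (B always; A raises unless its
-- early break on missing letters happens first, in which case A returns 0 while B raises).
def Pre_word_can_be_constucted (letters : List String) (word : String) : Prop :=
  (word.toList.all (fun c => !(letters.contains (String.ofList [c]))
      || wcbLetterPoints.contains (String.ofList [c]))) = true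
instance (letters : List String) (word : String) : Decidable (Pre_word_can_be_constucted letters word) := by unfold Pre_word_can_be_constucted; infer_instance
def pvWitness_word_can_be_constucted : List String × String := (["c", "a", "t", "_"], "cart")
def Spec_word_can_be_constucted (letters : List String) (word : String) (out : Int) : Prop := out = word_can_be_constucted_alt letters word
instance (letters : List String) (word : String) (out : Int) : Decidable (Spec_word_can_be_constucted letters word out) := by unfold Spec_word_can_be_constucted; infer_instance

-- ===== CLAIM (what is proved, stated in full; the proofs are below) =====
def Claim_equal_word_can_be_constucted : Prop := ∀ (letters : List String) (word : String), Dom_word_can_be_constucted letters word → Pre_word_can_be_constucted letters word → Spec_word_can_be_constucted letters word (word_can_be_constucted letters word)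

-- ===== LEMMAS AND PROOFS =====

-- count of c in the word / count of the one-char string of c in the available letters, as Int
def wcbCW (w : List Char) (c : Char) : Int := (List.count c w : Int)
def wcbCA (L : List String) (c : Char) : Int := (List.count (String.ofList [c]) L : Int)
-- per-distinct-character score and missing contributions
def wcbF (w : List Char) (L : List String) (c : Char) : Int :=
  min (wcbCW w c) (wcbCA L c) * wcbPts (String.ofList [c])
def wcbG (w : List Char) (L : List String) (c : Char) : Int :=
  max 0 (wcbCW w c - wcbCA L c)

-- A's loop without accumulators and without the break: (points, missing) produced by the scan
def wcbSpecLoop : List Char → List String → Int × Int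
  | [], _ => (0, 0)
  | c :: rest, avail =>
    if String.ofList [c] ∈ avail then
      ((wcbSpecLoop rest (avail.erase (String.ofList [c]))).1 + wcbPts (String.ofList [c]),
       (wcbSpecLoop rest (avail.erase (String.ofList [c]))).2)
    else
      ((wcbSpecLoop rest avail).1, (wcbSpecLoop rest avail).2 + 1)

lemma wcbOfList_single_inj {a b : Char} (h : String.ofList [a] = String.ofList [b]) : a = b := by
  have h2 := congrArg String.toList h
  simpa using h2

lemma wcbSpecLoop_snd_nonneg (w : List Char) : ∀ avail, 0 ≤ (wcbSpecLoop w avail).2 := by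
  induction w with
  | nil => intro avail; simp [wcbSpecLoop]
  | cons c rest ih =>
    intro avail
    have h1 := ih (avail.erase (String.ofList [c]))
    have h2 := ih avail
    by_cases h : String.ofList [c] ∈ avail <;> simp [wcbSpecLoop, h] <;> omega

lemma wcbLoop_eq (blanks : Int) (w : List Char) : ∀ (avail : List String) (missing points : Int),
    wcbLoop blanks w missing points avail =
      if missing + (wcbSpecLoop w avail).2 > blanks then 0
      else points + (wcbSpecLoop w avail).1 := by
  induction w with
  | nil => intro avail missing points; simp [wcbLoop, wcbSpecLoop]
  | cons c rest ih =>
    intro avail missing points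
    by_cases h : String.ofList [c] ∈ avail
    · have hc : avail.contains (String.ofList [c]) = true := List.contains_iff_mem.mpr h
      rw [wcbLoop, if_pos hc, PySem.List.remove?_eq_some_erase avail _ h]
      simp only [Option.getD_some]
      rw [ih]
      simp only [wcbSpecLoop, if_pos h]
      split_ifs <;> omega
    · rw [wcbLoop, if_neg (by simpa using h)]
      have hnn := wcbSpecLoop_snd_nonneg rest avail
      by_cases hb : missing + 1 > blanks
      · rw [if_pos hb]
        simp only [wcbSpecLoop, if_neg h]
        rw [if_pos (by omega)]
      · rw [if_neg hb, ih]
        simp only [wcbSpecLoop, if_neg h]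
        split_ifs <;> omega

-- one step of the distinct-character sums: shared shape for both components
lemma wcbSumStep {f f' : Char → Int} {δ : Int} (a : Char) (S : Finset Char)
    (ha_eq : f a = f' a + δ)
    (hne : ∀ c ∈ S, c ≠ a → f c = f' c)
    (ha_out : a ∉ S → f' a = 0) :
    ∑ c ∈ insert a S, f c = (∑ c ∈ S, f' c) + δ := by
  by_cases ha : a ∈ S
  · rw [Finset.insert_eq_self.mpr ha]
    rw [← Finset.add_sum_erase S f ha, ← Finset.add_sum_erase S f' ha]
    have hsum : ∑ c ∈ S.erase a, f c = ∑ c ∈ S.erase a, f' c := by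
      refine Finset.sum_congr rfl ?_
      intro c hc
      exact hne c (Finset.mem_of_mem_erase hc) (Finset.ne_of_mem_erase hc)
    rw [hsum, ha_eq]; ring
  · rw [Finset.sum_insert ha]
    have hsum : ∑ c ∈ S, f c = ∑ c ∈ S, f' c := by
      refine Finset.sum_congr rfl ?_
      intro c hc
      exact hne c hc (fun e => ha (e ▸ hc))
    rw [hsum, ha_eq, ha_out ha]; ring

lemma wcbCW_cons_self (a : Char) (rest : List Char) : wcbCW (a :: rest) a = wcbCW rest a + 1 := by
  simp [wcbCW, List.count_cons_self]

lemma wcbCW_cons_ne {c a : Char} (h : c ≠ a) (rest : List Char) :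
    wcbCW (a :: rest) c = wcbCW rest c := by
  simp [wcbCW, List.count_cons_of_ne (Ne.symm h)]

lemma wcbCA_erase_ne {c a : Char} (h : c ≠ a) (avail : List String) :
    wcbCA (avail.erase (String.ofList [a])) c = wcbCA avail c := by
  simp [wcbCA, List.count_erase_of_ne (fun e => h (wcbOfList_single_inj e))]

lemma wcbCA_erase_self {a : Char} {avail : List String} (h : String.ofList [a] ∈ avail) :
    wcbCA (avail.erase (String.ofList [a])) a = wcbCA avail a - 1 := by
  unfold wcbCA
  rw [List.count_erase_self, Nat.cast_sub (List.count_pos_iff.mpr h), Nat.cast_one]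

lemma wcbCW_nonneg (w : List Char) (c : Char) : 0 ≤ wcbCW w c := Int.natCast_nonneg _

lemma wcbCW_eq_zero {a : Char} {rest : List Char} (h : a ∉ rest) : wcbCW rest a = 0 := by
  simp [wcbCW, List.count_eq_zero.mpr h]

lemma wcbCA_eq_zero {a : Char} {avail : List String} (h : String.ofList [a] ∉ avail) :
    wcbCA avail a = 0 := by
  simp [wcbCA, List.count_eq_zero.mpr h]

lemma wcbSpecLoop_eq_sums (w : List Char) : ∀ (avail : List String),
    wcbSpecLoop w avail =
      (∑ c ∈ w.toFinset, wcbF w avail c, ∑ c ∈ w.toFinset, wcbG w avail c) := by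
  induction w with
  | nil => intro avail; simp [wcbSpecLoop]
  | cons a rest ih =>
    intro avail
    rw [List.toFinset_cons]
    by_cases h : String.ofList [a] ∈ avail
    · have hca : 1 ≤ wcbCA avail a := by
        have := List.count_pos_iff.mpr h
        unfold wcbCA; exact_mod_cast this
      have h1 : ∑ c ∈ (insert a rest.toFinset), wcbF (a :: rest) avail c =
          (∑ c ∈ rest.toFinset, wcbF rest (avail.erase (String.ofList [a])) c) + wcbPts (String.ofList [a]) := by
        refine wcbSumStep a rest.toFinset ?_ ?_ ?_
        · unfold wcbF
          rw [wcbCW_cons_self, wcbCA_erase_self h]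
          have hmin : min (wcbCW rest a + 1) (wcbCA avail a) = min (wcbCW rest a) (wcbCA avail a - 1) + 1 := by
            omega
          rw [hmin]; ring
        · intro c _ hc
          unfold wcbF
          rw [wcbCW_cons_ne hc, wcbCA_erase_ne hc]
        · intro ha
          unfold wcbF
          rw [wcbCW_eq_zero (by simpa using ha)]
          have : min (0 : Int) (wcbCA (avail.erase (String.ofList [a])) a) = 0 := by
            have := wcbCA_erase_self h
            omega
          rw [this, zero_mul]
      have h2 : ∑ c ∈ (insert a rest.toFinset), wcbG (a :: rest) avail c =
          (∑ c ∈ rest.toFinset, wcbG rest (avail.erase (String.ofList [a])) c) + 0 := by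
        refine wcbSumStep a rest.toFinset ?_ ?_ ?_
        · unfold wcbG
          rw [wcbCW_cons_self, wcbCA_erase_self h]
          omega
        · intro c _ hc
          unfold wcbG
          rw [wcbCW_cons_ne hc, wcbCA_erase_ne hc]
        · intro ha
          unfold wcbG
          rw [wcbCW_eq_zero (by simpa using ha), wcbCA_erase_self h]
          omega
      simp only [wcbSpecLoop, if_pos h, ih]
      rw [h1, h2]; ring_nf
    · have hca : wcbCA avail a = 0 := wcbCA_eq_zero h
      have h1 : ∑ c ∈ (insert a rest.toFinset), wcbF (a :: rest) avail c =
          (∑ c ∈ rest.toFinset, wcbF rest avail c) + 0 := by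
        refine wcbSumStep a rest.toFinset ?_ ?_ ?_
        · unfold wcbF
          rw [wcbCW_cons_self, hca]
          have hn := wcbCW_nonneg rest a
          have hmin : min (wcbCW rest a + 1) (0 : Int) = min (wcbCW rest a) 0 := by omega
          rw [hmin]; ring
        · intro c _ hc
          unfold wcbF
          rw [wcbCW_cons_ne hc]
        · intro ha
          unfold wcbF
          rw [wcbCW_eq_zero (by simpa using ha), hca]
          simp
      have h2 : ∑ c ∈ (insert a rest.toFinset), wcbG (a :: rest) avail c =
          (∑ c ∈ rest.toFinset, wcbG rest avail c) + 1 := by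
        refine wcbSumStep a rest.toFinset ?_ ?_ ?_
        · unfold wcbG
          rw [wcbCW_cons_self, hca]
          have hn := wcbCW_nonneg rest a
          omega
        · intro c _ hc
          unfold wcbG
          rw [wcbCW_cons_ne hc]
        · intro ha
          unfold wcbG
          rw [wcbCW_eq_zero (by simpa using ha), hca]
          omega
      simp only [wcbSpecLoop, if_neg h, ih]
      rw [h1, h2]; ring_nf

lemma wcbFoldlAdd {α : Type} (f : α → Int) (step : Int → α → Int)
    (h : ∀ x p, step x p = x + f p) : ∀ (l : List α) (a : Int),
    List.foldl step a l = a + (l.map f).sum := by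
  intro l
  induction l with
  | nil => intro a; simp
  | cons p l ih => intro a; simp [List.foldl_cons, h, ih, add_assoc]

lemma wcbSumOfList (f : Char → Int) (w : List Char) :
    ((PySem.Set.ofList w).map f).sum = ∑ c ∈ w.toFinset, f c := by
  have hfin : (PySem.Set.ofList w).toFinset = w.toFinset := by
    ext x; simp [List.mem_toFinset, PySem.Set.mem_ofList]
  rw [← List.sum_toFinset f (PySem.Set.nodup_ofList w), hfin]

lemma wcbAlt_eq (letters : List String) (word : String) :
    word_can_be_constucted_alt letters word =
      if (∑ c ∈ word.toList.toFinset, wcbG word.toList letters c) ≤ (List.count "_" letters : Int)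
      then ∑ c ∈ word.toList.toFinset, wcbF word.toList letters c else 0 := by
  simp only [word_can_be_constucted_alt]
  rw [PySem.List.count_eq, PySem.Dict.foldl_insert_getD_add_one_eq_counter,
      PySem.Dict.items_counter]
  rw [PySem.List.foldl_prod_mk
        (fun (x : Int) (p : Char × Int) =>
          if (if p.2 < (PySem.List.count letters (String.ofList [p.1]) : Int) then p.2
              else (PySem.List.count letters (String.ofList [p.1]) : Int)) ≠ 0 then
            x + (if p.2 < (PySem.List.count letters (String.ofList [p.1]) : Int) then p.2
                 else (PySem.List.count letters (String.ofList [p.1]) : Int)) * wcbPts (String.ofList [p.1])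
          else x)
        (fun (y : Int) (p : Char × Int) =>
          if p.2 > (PySem.List.count letters (String.ofList [p.1]) : Int) then
            y + (p.2 - (PySem.List.count letters (String.ofList [p.1]) : Int))
          else y)]
  rw [wcbFoldlAdd
        (fun (p : Char × Int) =>
          if (if p.2 < (PySem.List.count letters (String.ofList [p.1]) : Int) then p.2
              else (PySem.List.count letters (String.ofList [p.1]) : Int)) ≠ 0 then
            (if p.2 < (PySem.List.count letters (String.ofList [p.1]) : Int) then p.2
             else (PySem.List.count letters (String.ofList [p.1]) : Int)) * wcbPts (String.ofList [p.1])
          else 0)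
        _ (by intro x p; dsimp only; split_ifs <;> ring) _ 0]
  rw [wcbFoldlAdd
        (fun (p : Char × Int) =>
          if p.2 > (PySem.List.count letters (String.ofList [p.1]) : Int) then
            p.2 - (PySem.List.count letters (String.ofList [p.1]) : Int)
          else 0)
        _ (by intro x p; dsimp only; split_ifs <;> ring) _ 0]
  simp only [List.map_map, zero_add]
  have hF : ∀ c ∈ PySem.Set.ofList word.toList,
      ((fun (p : Char × Int) =>
          if (if p.2 < (PySem.List.count letters (String.ofList [p.1]) : Int) then p.2
              else (PySem.List.count letters (String.ofList [p.1]) : Int)) ≠ 0 then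
            (if p.2 < (PySem.List.count letters (String.ofList [p.1]) : Int) then p.2
             else (PySem.List.count letters (String.ofList [p.1]) : Int)) * wcbPts (String.ofList [p.1])
          else 0) ∘ (fun k => (k, (List.count k word.toList : Int)))) c = wcbF word.toList letters c := by
    intro c _
    simp only [Function.comp]
    rw [PySem.List.count_eq]
    have hmin : (if (List.count c word.toList : Int) < (List.count (String.ofList [c]) letters : Int)
        then (List.count c word.toList : Int) else (List.count (String.ofList [c]) letters : Int))
        = min (wcbCW word.toList c) (wcbCA letters c) := by
      unfold wcbCW wcbCA; split_ifs <;> omega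
    rw [hmin]
    unfold wcbF
    by_cases hz : min (wcbCW word.toList c) (wcbCA letters c) = 0
    · simp [hz]
    · rw [if_pos hz]
  have hG : ∀ c ∈ PySem.Set.ofList word.toList,
      ((fun (p : Char × Int) =>
          if p.2 > (PySem.List.count letters (String.ofList [p.1]) : Int) then
            p.2 - (PySem.List.count letters (String.ofList [p.1]) : Int)
          else 0) ∘ (fun k => (k, (List.count k word.toList : Int)))) c = wcbG word.toList letters c := by
    intro c _
    simp only [Function.comp]
    rw [PySem.List.count_eq]
    unfold wcbG wcbCW wcbCA
    split_ifs <;> omega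
  rw [List.map_congr_left hF, List.map_congr_left hG, wcbSumOfList, wcbSumOfList]

lemma wcbA_eq (letters : List String) (word : String) :
    word_can_be_constucted letters word =
      if (∑ c ∈ word.toList.toFinset, wcbG word.toList letters c) > (List.count "_" letters : Int)
      then 0 else ∑ c ∈ word.toList.toFinset, wcbF word.toList letters c := by
  simp only [word_can_be_constucted]
  rw [PySem.List.count_eq, wcbLoop_eq, wcbSpecLoop_eq_sums]
  simp

-- ===== VERDICT (by name: the statement is the Claim_ definition above) =====
theorem word_can_be_constucted_spec : Claim_equal_word_can_be_constucted := by
  intro letters word _ _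
  unfold Spec_word_can_be_constucted
  rw [wcbA_eq, wcbAlt_eq]
  split_ifs <;> omega
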